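-- pv_equiv track=rewrite | github.com/hacetheworld/competitive-programming-practices | problems/Nastya_Door.py | Solution
-- ===== SOURCE A (Python) =====
-- def Solution(arr, N, K):
--     # Solution
--     p = 0
--     l = 0
--     for i in range(len(arr)-K):
--         runningCount = 0
--         for j in range(i, i+K-1):
--             if isPeak(arr, j):
--                 runningCount += 1
--         if runningCount > p:
--             p = runningCount
--             l = i
--
--     return (p+1, l+1)
--
-- def isPeak(arr, i):
--     return i > 0 and i < len(arr) and arr[i] > arr[i-1] and arr[i] > arr[i+1]
-- ===== SOURCE B (Python) =====
-- def Solution(arr, N, K):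
--     # Precompute prefix sums of the peak indicator once, then answer each
--     # window in O(1): O(N) instead of A's O(N*K).
--     n = len(arr)
--     pre = [0]
--     for j in range(n):
--         is_pk = 0 < j < n - 1 and arr[j] > arr[j - 1] and arr[j] > arr[j + 1]
--         pre.append(pre[j] + (1 if is_pk else 0))
--     best = 0
--     loc = 0
--     for i in range(n - K):
--         hi = i + K - 1
--         c = pre[hi] - pre[i] if hi > i else 0
--         if c > best:
--             best = c
--             loc = i
--     return (best + 1, loc + 1)
-- ===== Notes on version B (the rewrite author's own statement) =====
-- stated objective: faster
-- what changed: B precomputes a prefix-sum array of the peak indicator once and answers each window query in O(1), replacing A's inner rescan of every window.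
import Mathlib
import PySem

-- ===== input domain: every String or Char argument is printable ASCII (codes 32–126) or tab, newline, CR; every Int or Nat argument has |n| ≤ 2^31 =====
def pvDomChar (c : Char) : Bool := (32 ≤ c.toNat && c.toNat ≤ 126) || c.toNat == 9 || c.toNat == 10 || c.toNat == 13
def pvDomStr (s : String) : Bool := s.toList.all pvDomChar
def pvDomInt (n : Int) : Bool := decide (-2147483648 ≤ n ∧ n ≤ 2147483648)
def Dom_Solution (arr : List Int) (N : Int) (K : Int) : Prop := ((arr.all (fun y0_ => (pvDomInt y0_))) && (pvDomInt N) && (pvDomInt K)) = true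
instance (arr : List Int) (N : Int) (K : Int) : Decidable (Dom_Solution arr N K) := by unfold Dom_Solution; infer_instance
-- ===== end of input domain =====

-- B replaces A's O(N*K) rescan of every window by one precomputed prefix-sum
-- array of the peak indicator with O(1) window queries (objective: faster).

-- ===== PORT A =====
-- isPeak: Solution only calls it with 0 <= i <= len-3, where every index is in
-- range; the pyGetD default 0 is never consulted on those calls.
def isPeakA (arr : List Int) (i : Int) : Bool :=
  decide (0 < i) && decide (i < (arr.length : Int)) &&
  decide (PySem.List.pyGetD arr (i-1) 0 < PySem.List.pyGetD arr i 0) &&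
  decide (PySem.List.pyGetD arr (i+1) 0 < PySem.List.pyGetD arr i 0)

def Solution (arr : List Int) (N : Int) (K : Int) : List Int :=
  let st := (PySem.List.pyRange 0 ((arr.length : Int) - K) 1).foldl
    (fun (pl : Int × Int) i =>
      let rc := (PySem.List.pyRange i (i + K - 1) 1).foldl
        (fun c j => if isPeakA arr j then c + 1 else c) (0 : Int)
      if pl.1 < rc then (rc, i) else pl)
    ((0 : Int), (0 : Int))
  [st.1 + 1, st.2 + 1]

-- ===== PORT B =====
def isPeakB (arr : List Int) (n : Int) (j : Int) : Bool :=
  decide (0 < j) && decide (j < n - 1) &&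
  decide (PySem.List.pyGetD arr (j-1) 0 < PySem.List.pyGetD arr j 0) &&
  decide (PySem.List.pyGetD arr (j+1) 0 < PySem.List.pyGetD arr j 0)

def Solution_alt (arr : List Int) (N : Int) (K : Int) : List Int :=
  let n : Int := (arr.length : Int)
  let pre : List Int := (PySem.List.pyRange 0 n 1).foldl
    (fun pre j => pre ++ [PySem.List.pyGetD pre j 0 + (if isPeakB arr n j then 1 else 0)]) [0]
  let st := (PySem.List.pyRange 0 (n - K) 1).foldl
    (fun (pl : Int × Int) i =>
      let hi := i + K - 1
      let c := if i < hi then PySem.List.pyGetD pre hi 0 - PySem.List.pyGetD pre i 0 else 0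
      if pl.1 < c then (c, i) else pl)
    ((0 : Int), (0 : Int))
  [st.1 + 1, st.2 + 1]

-- ===== PRECONDITION & SPEC =====
def Spec_Solution (arr : List Int) (N : Int) (K : Int) (out : List Int) : Prop := out = Solution_alt arr N K
instance (arr : List Int) (N : Int) (K : Int) (out : List Int) : Decidable (Spec_Solution arr N K out) := by unfold Spec_Solution; infer_instance

-- ===== CLAIM (what is proved, stated in full; the proofs are below) =====
def Claim_equal_Solution : Prop := ∀ (arr : List Int) (N : Int) (K : Int), Dom_Solution arr N K → Spec_Solution arr N K (Solution arr N K)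

-- ===== LEMMAS AND PROOFS =====

-- prefix-sum value: number of B-peaks among 0..t-1, as the sum of indicators
def sbSum (arr : List Int) (n t : Int) : Int :=
  ((PySem.List.pyRange 0 t 1).map (fun j => if isPeakB arr n j then (1:Int) else 0)).sum

theorem sbSum_succ (arr : List Int) (n m : Int) (hm : 0 ≤ m) :
    sbSum arr n (m+1) = sbSum arr n m + (if isPeakB arr n m then (1:Int) else 0) := by
  unfold sbSum
  rw [PySem.List.pyRange_one_succ_right hm, List.map_append, List.sum_append]
  simp

theorem pre_eq (arr : List Int) (n : Int) : ∀ (m : Nat),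
    (PySem.List.pyRange 0 (m : Int) 1).foldl
      (fun pre j => pre ++ [PySem.List.pyGetD pre j 0 + (if isPeakB arr n j then 1 else 0)]) [0]
    = (PySem.List.pyRange 0 ((m : Int)+1) 1).map (sbSum arr n) := by
  intro m
  induction m with
  | zero =>
      have h01 : PySem.List.pyRange 0 1 1 = [0] := PySem.List.pyRange_one_singleton 0
      rw [show ((0:Nat):Int) = 0 from rfl, show (0:Int)+1 = 1 from rfl, h01,
        PySem.List.pyRange_one_eq_nil (le_refl (0:Int))]
      simp [sbSum, PySem.List.pyRange_one_eq_nil (le_refl (0:Int))]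
  | succ m ih =>
      have h1 : ((m+1 : Nat) : Int) = (m : Int) + 1 := by push_cast; ring
      rw [h1, PySem.List.pyRange_one_succ_right (by positivity), List.foldl_append, ih]
      have hget : PySem.List.pyGetD ((PySem.List.pyRange 0 ((m : Int)+1) 1).map (sbSum arr n)) (m : Int) 0
          = sbSum arr n (m : Int) := by
        have := PySem.List.pyGetD_map_pyRange_of_nonneg (sbSum arr n) ((m : Int)+1) (m : Int) 0
          (by positivity) (by omega)
        exact this
      rw [PySem.List.pyRange_one_succ_right (a := 0) (b := (m : Int) + 1) (by positivity),
        List.map_append]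
      simp only [List.foldl_cons, List.foldl_nil, hget, List.map_cons, List.map_nil]
      rw [sbSum_succ arr n (m : Int) (by positivity)]

-- the two indicators agree strictly left of the last index
theorem peak_agree (arr : List Int) (j : Int) (hj : j < (arr.length : Int) - 1) :
    isPeakA arr j = isPeakB arr (arr.length : Int) j := by
  unfold isPeakA isPeakB
  have h1 : decide (j < (arr.length : Int)) = decide (j < (arr.length : Int) - 1) := by
    by_cases h : j < (arr.length : Int) - 1 <;> simp [h] <;> omega
  rw [h1]

-- A's inner window scan equals the prefix-sum difference B reads off
theorem window_eq (arr : List Int) (K i : Int)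
    (h0 : 0 ≤ i) (hi2 : i < (arr.length : Int) - K) :
    (PySem.List.pyRange i (i + K - 1) 1).foldl
      (fun c j => if isPeakA arr j then c + 1 else c) (0 : Int)
    = (if i < i + K - 1 then
        PySem.List.pyGetD ((PySem.List.pyRange 0 ((arr.length : Int)+1) 1).map (sbSum arr (arr.length : Int))) (i + K - 1) 0
        - PySem.List.pyGetD ((PySem.List.pyRange 0 ((arr.length : Int)+1) 1).map (sbSum arr (arr.length : Int))) i 0
       else 0) := by
  by_cases hK : i < i + K - 1
  · have hKge : 2 ≤ K := by omega
    have hhi : i + K - 1 < (arr.length : Int) - 1 := by omega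
    rw [if_pos hK]
    rw [PySem.List.pyGetD_map_pyRange_of_nonneg (sbSum arr (arr.length : Int)) ((arr.length : Int)+1) (i+K-1) 0 (by omega) (by omega)]
    rw [PySem.List.pyGetD_map_pyRange_of_nonneg (sbSum arr (arr.length : Int)) ((arr.length : Int)+1) i 0 h0 (by omega)]
    -- split the 0..hi prefix at i
    have hsplit : sbSum arr (arr.length : Int) (i+K-1) = sbSum arr (arr.length : Int) i +
        ((PySem.List.pyRange i (i+K-1) 1).map (fun j => if isPeakB arr (arr.length : Int) j then (1:Int) else 0)).sum := by
      unfold sbSum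
      rw [PySem.List.pyRange_one_append 0 i (i+K-1) h0 (by omega), List.map_append, List.sum_append]
    rw [hsplit]
    have hfold : (PySem.List.pyRange i (i + K - 1) 1).foldl
        (fun c j => if isPeakA arr j then c + 1 else c) (0 : Int)
        = (PySem.List.pyRange i (i + K - 1) 1).foldl
        (fun c j => c + (if isPeakB arr (arr.length : Int) j then (1:Int) else 0)) (0 : Int) := by
      apply PySem.List.foldl_congr_mem
      intro acc x hx
      have hxlt : x < i + K - 1 := (PySem.List.mem_pyRange_one.mp hx).2
      rw [peak_agree arr x (by omega)]
      by_cases h : isPeakB arr (arr.length : Int) x <;> simp [h]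
    rw [hfold, PySem.List.foldl_add]
    ring
  · rw [if_neg hK, PySem.List.pyRange_one_eq_nil (by omega)]
    rfl

-- ===== VERDICT (by name: the statement is the Claim_ definition above) =====
theorem Solution_spec : Claim_equal_Solution := by
  intro arr N K _
  unfold Spec_Solution Solution Solution_alt
  simp only []
  rw [show (PySem.List.pyRange 0 ((arr.length : Int)) 1).foldl
      (fun pre j => pre ++ [PySem.List.pyGetD pre j 0 + (if isPeakB arr (arr.length : Int) j then 1 else 0)]) [0]
      = (PySem.List.pyRange 0 (((arr.length : Int))+1) 1).map (sbSum arr (arr.length : Int))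
    from pre_eq arr (arr.length : Int) arr.length]
  have hfold : (PySem.List.pyRange 0 ((arr.length : Int) - K) 1).foldl
      (fun (pl : Int × Int) i =>
        let rc := (PySem.List.pyRange i (i + K - 1) 1).foldl
          (fun c j => if isPeakA arr j then c + 1 else c) (0 : Int)
        if pl.1 < rc then (rc, i) else pl)
      ((0 : Int), (0 : Int))
      = (PySem.List.pyRange 0 ((arr.length : Int) - K) 1).foldl
      (fun (pl : Int × Int) i =>
        let hi := i + K - 1
        let c := if i < hi then
            PySem.List.pyGetD ((PySem.List.pyRange 0 (((arr.length : Int))+1) 1).map (sbSum arr (arr.length : Int))) hi 0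
            - PySem.List.pyGetD ((PySem.List.pyRange 0 (((arr.length : Int))+1) 1).map (sbSum arr (arr.length : Int))) i 0
          else 0
        if pl.1 < c then (c, i) else pl)
      ((0 : Int), (0 : Int)) := by
    apply PySem.List.foldl_congr_mem
    intro acc x hx
    have hm := PySem.List.mem_pyRange_one.mp hx
    simp only []
    rw [window_eq arr K x hm.1 hm.2]
  rw [hfold]
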